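-- pv_equiv track=rewrite | github.com/communitiesuk/funding-service-design-docker-runner | app/all_questions/read_forms.py | strip_leading_numbers
-- ===== SOURCE A (Python) =====
-- def strip_leading_numbers(text: str) -> str:
--     """Removes leading numbers and . from a string
--
--     Args:
--         text (str): String to remove leading numbers from, eg. `2.2. A Title`
--
--     Returns:
--         str: Stripped string, eg. `A Title`
--     """
--     result = text
--     for char in text:
--         if char == " ":
--             break
--         if char.isdigit() or char == ".":
--             result = result[1:]  # strip this character
--     return result.strip()
-- ===== SOURCE B (Python) =====
-- def strip_leading_numbers(text: str) -> str:
--     prefix = text.split(" ", 1)[0]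
--     n = sum(1 for c in prefix if c.isdigit() or c == ".")
--     return text[n:].strip()
-- ===== Notes on version B (the rewrite author's own statement) =====
-- stated objective: simpler
-- what changed: B counts the digit/dot characters in the prefix before the first space in one pass and removes them with a single slice, instead of A's loop that repeatedly front-slices the whole string per character.
import Mathlib
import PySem

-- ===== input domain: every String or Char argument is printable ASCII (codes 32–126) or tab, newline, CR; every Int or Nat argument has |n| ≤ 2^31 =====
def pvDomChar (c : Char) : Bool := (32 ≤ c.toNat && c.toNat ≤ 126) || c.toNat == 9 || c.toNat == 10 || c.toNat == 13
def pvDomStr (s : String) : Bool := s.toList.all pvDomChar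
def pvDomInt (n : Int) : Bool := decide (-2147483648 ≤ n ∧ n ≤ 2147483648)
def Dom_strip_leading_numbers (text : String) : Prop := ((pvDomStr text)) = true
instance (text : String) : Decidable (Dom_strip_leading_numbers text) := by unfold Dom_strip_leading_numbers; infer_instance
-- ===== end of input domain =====

-- B counts the digit/dot characters before the first space and removes them with one slice, instead of A's per-character repeated front-slicing (simpler: one counting pass + one slice).
-- ===== PORT A =====
-- the for-loop of A: state 'res' is Python's 'result'; 'break' on ' ' returns res
def pvLoopA (l : List Char) (res : List Char) : List Char :=
  match l with
  | [] => res
  | c :: rest =>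
      if c = ' ' then res
      else pvLoopA rest
        (if PySem.Chars.isdigit c || c = '.' then PySem.List.slice res (some 1) none else res)

def strip_leading_numbers (text : String) : String :=
  String.ofList (PySem.Chars.strip (pvLoopA text.toList text.toList))

-- ===== PORT B =====
def strip_leading_numbers_alt (text : String) : String :=
  let pre := text.toList.takeWhile (fun c => c ≠ ' ')
  let n := (pre.filter (fun c => PySem.Chars.isdigit c || c = '.')).length
  String.ofList (PySem.Chars.strip (text.toList.drop n))

-- ===== PRECONDITION & SPEC =====
def Spec_strip_leading_numbers (text : String) (out : String) : Prop := out = strip_leading_numbers_alt text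
instance (text : String) (out : String) : Decidable (Spec_strip_leading_numbers text out) := by unfold Spec_strip_leading_numbers; infer_instance

-- ===== CLAIM (what is proved, stated in full; the proofs are below) =====
def Claim_equal_strip_leading_numbers : Prop := ∀ (text : String), Dom_strip_leading_numbers text → Spec_strip_leading_numbers text (strip_leading_numbers text)

-- ===== LEMMAS AND PROOFS =====
-- invariant of A's loop: it drops from 'res' one char per digit/dot seen before the first space
theorem pvLoopA_eq (l : List Char) (res : List Char) :
    pvLoopA l res
      = res.drop (((l.takeWhile (fun c => c ≠ ' ')).filter
          (fun c => PySem.Chars.isdigit c || c = '.')).length) := by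
  induction l generalizing res with
  | nil => simp [pvLoopA]
  | cons c rest ih =>
      by_cases hc : c = ' '
      · simp [pvLoopA, hc]
      · by_cases hp : (PySem.Chars.isdigit c || c = '.') = true
        · simp only [pvLoopA, ih, PySem.List.slice_from_one,
            List.takeWhile_cons, hc, decide_not, decide_false, Bool.not_false, if_true,
            List.filter_cons, hp]
          rw [← List.drop_one, List.drop_drop]
          simp [Nat.add_comm]
        · simp only [pvLoopA, ih,
            List.takeWhile_cons, hc, decide_not, decide_false, Bool.not_false, if_true,
            List.filter_cons, hp]
          simp

-- ===== VERDICT (by name: the statement is the Claim_ definition above) =====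
theorem strip_leading_numbers_spec : Claim_equal_strip_leading_numbers := by
  intro text _
  unfold Spec_strip_leading_numbers strip_leading_numbers strip_leading_numbers_alt
  rw [pvLoopA_eq]
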